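-- pv_equiv track=rewrite | github.com/mstockl9/ayed1-2025-tps | TP3/tp3ej2_matrizpatrones.py | diagonal_ascen_x3
-- ===== SOURCE A (Python) =====
-- from typing import List
--
-- def diagonal_ascen_x3(n: int) -> List[List[int]]:
--     """
--     Genera una matriz de N x N con un patrón que consiste en una diagonal ascendente de números a partir
--     del 1 que se multiplican por 3, con el resto de números siendo 0.
--
--     Pre: N debe ser un entero positivo.
--     Post: Retorna la matriz de N x N con el patrón descrito previamente.
--     """
--     matriz = [[] for fila in range(n)]
--     nro_x3 = 1
--
--     for i, fila in enumerate(matriz):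
--         for x in range(n):
--             if i == x:
--                 fila.append(nro_x3)
--             else:
--                 fila.append(0)
--         nro_x3 *= 3
--
--     matriz.reverse()
--     return matriz
-- ===== SOURCE B (Python) =====
-- def diagonal_ascen_x3(n):
--     M = [[0] * n for _ in range(n)]
--     for r in range(n):
--         M[r][n - 1 - r] = 3 ** (n - 1 - r)
--     return M
-- ===== Notes on version B (the rewrite author's own statement) =====
-- stated objective: simpler
-- what changed: B builds a zero matrix and fills only the n anti-diagonal cells with the closed form 3**(n-1-r), instead of A's per-cell if/else over all n*n cells with a running accumulator followed by a list reversal.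
import Mathlib
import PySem

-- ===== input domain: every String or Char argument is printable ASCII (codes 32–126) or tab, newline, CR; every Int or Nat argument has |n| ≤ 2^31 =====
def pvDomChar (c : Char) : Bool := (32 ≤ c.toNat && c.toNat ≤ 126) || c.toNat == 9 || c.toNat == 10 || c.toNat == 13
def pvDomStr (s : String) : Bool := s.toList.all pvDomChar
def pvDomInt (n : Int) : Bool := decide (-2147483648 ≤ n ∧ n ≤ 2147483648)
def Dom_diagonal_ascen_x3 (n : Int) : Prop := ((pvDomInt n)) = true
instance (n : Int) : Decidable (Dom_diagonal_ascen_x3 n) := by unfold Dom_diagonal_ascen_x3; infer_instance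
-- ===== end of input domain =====

-- B builds a zero matrix and fills only the anti-diagonal cells with the closed form 3^(n-1-r); A fills every cell with an if/else and a running accumulator, then reverses the row list.

-- ===== PORT A =====
def diagonal_ascen_x3 (n : Int) : List (List Int) :=
  let matriz : List (List Int) := (PySem.List.pyRange 0 n 1).map (fun _ => [])
  let st := (PySem.List.enumerate matriz 0).foldl
    (fun (st : List (List Int) × Int) p =>
      let fila := (PySem.List.pyRange 0 n 1).foldl
        (fun f x => if p.1 = x then f ++ [st.2] else f ++ [(0 : Int)]) p.2
      (st.1 ++ [fila], st.2 * 3)) ([], 1)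
  st.1.reverse

-- ===== PORT B =====
def diagonal_ascen_x3_alt (n : Int) : List (List Int) :=
  let M : List (List Int) := (PySem.List.pyRange 0 n 1).map (fun _ => List.replicate n.toNat (0 : Int))
  (PySem.List.pyRange 0 n 1).foldl
    (fun M r => M.modify r.toNat (fun row => row.set (n - 1 - r).toNat (3 ^ (n - 1 - r).toNat))) M

-- ===== PRECONDITION & SPEC =====
def Spec_diagonal_ascen_x3 (n : Int) (out : List (List Int)) : Prop := out = diagonal_ascen_x3_alt n
instance (n : Int) (out : List (List Int)) : Decidable (Spec_diagonal_ascen_x3 n out) := by unfold Spec_diagonal_ascen_x3; infer_instance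

-- ===== CLAIM (what is proved, stated in full; the proofs are below) =====
def Claim_equal_diagonal_ascen_x3 : Prop := ∀ (n : Int), Dom_diagonal_ascen_x3 n → Spec_diagonal_ascen_x3 n (diagonal_ascen_x3 n)

-- ===== LEMMAS AND PROOFS =====

-- closed form of one of A's rows (row index i, nonzero cell at column i with value 3^i)
def pvRowA (n : Int) (i : Nat) : List Int :=
  (PySem.List.pyRange 0 n 1).map (fun x => if (i : Int) = x then (3 : Int) ^ i else 0)

-- A's inner loop appends one cell per column
theorem pvInner (n i v : Int) (init : List Int) :
    (PySem.List.pyRange 0 n 1).foldl (fun f x => if i = x then f ++ [v] else f ++ [(0 : Int)]) init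
      = init ++ (PySem.List.pyRange 0 n 1).map (fun x => if i = x then v else 0) := by
  have h : (fun (f : List Int) (x : Int) => if i = x then f ++ [v] else f ++ [(0 : Int)])
      = fun f x => f ++ [if i = x then v else 0] := by
    funext f x; split <;> rfl
  rw [h, PySem.List.foldl_append_singleton_eq_map]

-- A's outer loop builds the rows in order, with accumulator 3^m after m rows
theorem pvOuter (n : Int) (m : Nat) :
    (PySem.List.enumerate (List.replicate m ([] : List Int)) 0).foldl
      (fun (st : List (List Int) × Int) p =>
        (st.1 ++ [(PySem.List.pyRange 0 n 1).foldl
          (fun f x => if p.1 = x then f ++ [st.2] else f ++ [(0 : Int)]) p.2], st.2 * 3)) ([], 1)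
      = ((List.range m).map (pvRowA n), (3 : Int) ^ m) := by
  induction m with
  | zero => simp [PySem.List.enumerate_nil]
  | succ m ih =>
      rw [List.replicate_succ', PySem.List.enumerate_append, List.foldl_append, ih]
      simp only [PySem.List.enumerate_cons, PySem.List.enumerate_nil, List.length_replicate,
        List.foldl_cons, List.foldl_nil, zero_add]
      rw [pvInner]
      rw [List.range_succ, List.map_append]
      apply Prod.ext
      · simp [pvRowA]
      · simp [pow_succ]

-- B's fill loop, cell-wise: the row at index j is modified exactly once, by the iteration r = j
theorem pvBfold (n : Int) (g : Int → List Int → List Int) (k : Nat) :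
    ∀ (a : Int) (M : List (List Int)) (j : Nat), 0 ≤ a → (n - a).toNat = k →
    ((PySem.List.pyRange a n 1).foldl (fun M r => M.modify r.toNat (g r)) M)[j]?
      = if a ≤ (j : Int) ∧ (j : Int) < n then (M[j]?).map (g (j : Int)) else M[j]? := by
  induction k with
  | zero =>
      intro a M j ha hk
      rw [PySem.List.pyRange_one_eq_nil (by omega)]
      simp only [List.foldl_nil]
      rw [if_neg (by omega)]
  | succ k ih =>
      intro a M j ha hk
      rw [PySem.List.pyRange_one_cons (by omega)]
      simp only [List.foldl_cons]
      rw [ih (a + 1) _ j (by omega) (by omega)]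
      by_cases hj : (j : Int) = a
      · have hja : a.toNat = j := by omega
        rw [if_neg (by omega), if_pos (by omega)]
        rw [List.getElem?_modify, hja, hj]
        simp
      · have hja : a.toNat ≠ j := by omega
        have hmap : ((fun row => if a.toNat = j then g a row else row) <$> M[j]?) = M[j]? := by
          cases M[j]? <;> simp [hja]
        rw [List.getElem?_modify, hmap]
        by_cases h2 : (a ≤ (j : Int) ∧ (j : Int) < n)
        · rw [if_pos (by omega), if_pos h2]
        · rw [if_neg (by omega), if_neg h2]

-- a row with a single nonzero cell, as map-over-range and as set-into-replicate
theorem pvRowSet (m i : Nat) (v : Int) :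
    (List.range m).map (fun x : Nat => if (i : Int) = (x : Int) then v else 0)
      = (List.replicate m (0 : Int)).set i v := by
  apply List.ext_getElem
  · simp
  · intro c h1 h2
    rw [List.getElem_map, List.getElem_range, List.getElem_set, List.getElem_replicate]
    by_cases hc : i = c
    · rw [if_pos (by exact_mod_cast hc), if_pos hc]
    · rw [if_neg (by exact_mod_cast hc), if_neg hc]

-- ===== VERDICT (by name: the statement is the Claim_ definition above) =====
theorem diagonal_ascen_x3_spec : Claim_equal_diagonal_ascen_x3 := by
  intro n _
  unfold Spec_diagonal_ascen_x3 diagonal_ascen_x3 diagonal_ascen_x3_alt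
  set m := n.toNat with hm
  have hrange : PySem.List.pyRange 0 n 1 = (List.range m).map (fun k : Nat => (k : Int)) :=
    PySem.List.pyRange_zero n
  -- A's matrix of empty rows is a replicate
  have hmat : (PySem.List.pyRange 0 n 1).map (fun _ => ([] : List Int)) = List.replicate m [] := by
    rw [hrange, List.map_map]
    simp [Function.comp_def]
  -- B's initial zero matrix is a replicate
  have hM0 : (PySem.List.pyRange 0 n 1).map (fun _ => List.replicate m (0 : Int))
      = List.replicate m (List.replicate m (0 : Int)) := by
    rw [hrange, List.map_map]
    simp [Function.comp_def]
  simp only [hmat, hM0, pvOuter n m]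
  apply List.ext_getElem?
  intro j
  by_cases hjm : j < m
  · -- left side: reversed row list
    have hlenA : (((List.range m).map (pvRowA n)).reverse).length = m := by simp
    have hA : (((List.range m).map (pvRowA n)).reverse)[j]? = some (pvRowA n (m - 1 - j)) := by
      rw [List.getElem?_reverse (by simpa using hjm)]
      simp only [List.length_map, List.length_range]
      rw [List.getElem?_map]
      simp [List.getElem?_range (show m - 1 - j < m by omega)]
    rw [hA, pvBfold n _ (n - 0).toNat 0 _ j (by omega) rfl]
    rw [if_pos (by constructor <;> omega)]
    rw [List.getElem?_replicate, if_pos hjm]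
    simp only [Option.map_some]
    congr 1
    -- pvRowA (m-1-j) = replicate.set (n-1-j).toNat (3^(n-1-j).toNat)
    have hnm : n = (m : Int) := by omega
    have he : (n - 1 - (j : Int)).toNat = m - 1 - j := by omega
    rw [he]
    unfold pvRowA
    rw [hrange, List.map_map]
    simpa [Function.comp_def] using pvRowSet m (m - 1 - j) ((3:Int) ^ (m - 1 - j))
  · -- out of range on both sides
    rw [List.getElem?_eq_none (by simp; omega)]
    rw [pvBfold n _ (n - 0).toNat 0 _ j (by omega) rfl]
    rw [if_neg (by omega), List.getElem?_eq_none (by simp; omega)]
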